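-- pv_equiv track=rewrite | github.com/haleyyew/integration_project_semantic_schema_matching | classification_evaluation.py | v1_transfer_topics
-- ===== SOURCE A (Python) =====
-- def v1_transfer_topics(kb):
--     kb_topics = {}
--
--     for topic in kb:
--         topic_matches = kb[topic]['matches']
--
--         if topic_matches == None: continue
--         if len(topic_matches) == 0: continue
--
--         if topic not in kb_topics: kb_topics[topic] = []
--         for ds in topic_matches:
--             kb_topics[topic].append(ds)
--
--     kb_topics_reverse = {}
--     for topic in kb_topics:
--         for ds in kb_topics[topic]:
--             if ds not in kb_topics_reverse: kb_topics_reverse[ds] = []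
--             kb_topics_reverse[ds].append(topic)
--
--     return kb_topics, kb_topics_reverse
-- ===== SOURCE B (Python) =====
-- def v1_transfer_topics(kb):
--     # Flatten kb to an edge list of (topic, dataset) pairs, then group the
--     # pairs (and the swapped pairs) by first occurrence of the key.
--     pairs = [(topic, ds)
--              for topic, info in kb.items()
--              if info['matches'] is not None
--              for ds in info['matches']]
--     return _group(pairs), _group([(ds, topic) for topic, ds in pairs])
--
-- def _group(pairs):
--     out = {}
--     for key, _ in pairs:
--         if key not in out:
--             out[key] = [v for k, v in pairs if k == key]
--     return out
-- ===== Notes on version B (the rewrite author's own statement) =====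
-- stated objective: alternative
-- what changed: Instead of A's incremental two-phase dict building (append each match into kb_topics, then a second pass appending into the reverse dict), B flattens kb into one (topic, dataset) edge list and derives both dictionaries with a single grouping routine that, at each key's first occurrence, collects all of its values by scanning the edge list (applied to the edge list and to its swap).
import Mathlib
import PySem

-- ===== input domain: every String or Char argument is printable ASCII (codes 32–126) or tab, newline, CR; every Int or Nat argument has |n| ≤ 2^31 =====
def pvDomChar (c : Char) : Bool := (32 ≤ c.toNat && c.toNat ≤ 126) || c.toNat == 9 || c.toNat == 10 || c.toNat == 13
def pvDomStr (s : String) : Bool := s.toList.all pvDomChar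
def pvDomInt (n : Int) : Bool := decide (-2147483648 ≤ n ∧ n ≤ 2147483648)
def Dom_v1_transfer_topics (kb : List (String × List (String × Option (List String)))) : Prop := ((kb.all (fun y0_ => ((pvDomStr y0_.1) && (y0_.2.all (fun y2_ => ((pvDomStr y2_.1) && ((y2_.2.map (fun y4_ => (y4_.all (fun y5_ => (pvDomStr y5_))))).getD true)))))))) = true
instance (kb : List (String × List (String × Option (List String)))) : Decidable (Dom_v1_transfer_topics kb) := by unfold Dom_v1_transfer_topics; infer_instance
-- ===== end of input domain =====

-- B replaces A's incremental two-phase dict building by flattening kb to a (topic, dataset)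
-- edge list and grouping it (and its swap) by first occurrence of the key (alternative; same output).

-- ===== PORT A =====
-- kb[topic]['matches']: inner-dict lookup, first match; default `none` stands for the
-- missing-key case, which Pre_ excludes (Python raises KeyError there).
def pvLookMatches (info : List (String × Option (List String))) : Option (List String) :=
  (PySem.Dict.mk info).getD "matches" none

-- one iteration of A's first loop (kb has unique keys under Pre_, so iterating the
-- (topic, inner) pairs is exactly `for topic in kb: ... kb[topic]`)
def pvA_phase1_body (d : PySem.Dict String (List String))
    (p : String × List (String × Option (List String))) : PySem.Dict String (List String) :=
  match pvLookMatches p.2 with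
  | none => d
  | some ms =>
    if ms.length = 0 then d
    else
      let d1 := if d.contains p.1 then d else d.insert p.1 ([] : List String)
      ms.foldl (fun d' ds => d'.modify p.1 [] (fun l => l ++ [ds])) d1

-- one iteration of A's second loop (over the items of kb_topics)
def pvA_phase2_body (r : PySem.Dict String (List String)) (p : String × List String) :
    PySem.Dict String (List String) :=
  p.2.foldl (fun r' ds =>
    let r1 := if r'.contains ds then r' else r'.insert ds ([] : List String)
    r1.modify ds [] (fun l => l ++ [p.1])) r

def v1_transfer_topics (kb : List (String × List (String × Option (List String)))) :
    (List (String × List String)) × (List (String × List String)) :=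
  let kbTopics := kb.foldl pvA_phase1_body PySem.Dict.empty
  let kbRev := kbTopics.items.foldl pvA_phase2_body PySem.Dict.empty
  (kbTopics.items, kbRev.items)

-- ===== PORT B =====
-- B's edge list: [(topic, ds) for topic, info in kb.items() if info['matches'] is not None
--                 for ds in info['matches']]
def pvPairs (kb : List (String × List (String × Option (List String)))) :
    List (String × String) :=
  kb.flatMap (fun p =>
    match (PySem.Dict.mk p.2).getD "matches" none with
    | none => []
    | some ms => ms.map (fun ds => (p.1, ds)))

-- B's _group: at each key's first occurrence, one scan of the whole edge list
-- collects all of that key's values ([v for k, v in pairs if k == key]).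
def pvGroup (pairs : List (String × String)) : PySem.Dict String (List String) :=
  pairs.foldl (fun out q =>
    if out.contains q.1 then out
    else out.insert q.1 ((pairs.filter (fun r => r.1 == q.1)).map Prod.snd))
    PySem.Dict.empty

def v1_transfer_topics_alt (kb : List (String × List (String × Option (List String)))) :
    (List (String × List String)) × (List (String × List String)) :=
  let pairs := pvPairs kb
  ((pvGroup pairs).items, (pvGroup (pairs.map (fun q => (q.2, q.1)))).items)

-- ===== PRECONDITION & SPEC =====
-- Pre_ excludes (a) association lists with duplicate keys at either level, which cannot
-- arise from a Python dict (lookup/iteration order would be ambiguous), and (b) inner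
-- dicts lacking the "matches" key, on which A raises KeyError.
def Pre_v1_transfer_topics (kb : List (String × List (String × Option (List String)))) : Prop :=
  (kb.map Prod.fst).Nodup ∧
  ∀ p ∈ kb, (p.2.map Prod.fst).Nodup ∧ "matches" ∈ p.2.map Prod.fst
instance (kb : List (String × List (String × Option (List String)))) : Decidable (Pre_v1_transfer_topics kb) := by unfold Pre_v1_transfer_topics; infer_instance

def pvWitness_v1_transfer_topics : (List (String × List (String × Option (List String)))) :=
  [("t1", [("matches", some ["d1", "d2"])]),
   ("t2", [("matches", some ["d2"])]),
   ("t3", [("matches", none)])]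

def Spec_v1_transfer_topics (kb : List (String × List (String × Option (List String)))) (out : (List (String × List String)) × (List (String × List String))) : Prop := out = v1_transfer_topics_alt kb
instance (kb : List (String × List (String × Option (List String)))) (out : (List (String × List String)) × (List (String × List String))) : Decidable (Spec_v1_transfer_topics kb out) := by unfold Spec_v1_transfer_topics; infer_instance

-- ===== CLAIM (what is proved, stated in full; the proofs are below) =====
def Claim_equal_v1_transfer_topics : Prop := ∀ (kb : List (String × List (String × Option (List String)))), Dom_v1_transfer_topics kb → Pre_v1_transfer_topics kb → Spec_v1_transfer_topics kb (v1_transfer_topics kb)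

-- ===== LEMMAS AND PROOFS =====

-- the (topic, matches) pairs both programs actually process, in order
def pvValid : List (String × List (String × Option (List String))) →
    List (String × List String)
  | [] => []
  | p :: kb =>
    match (PySem.Dict.mk p.2).getD "matches" none with
    | none => pvValid kb
    | some ms => if ms.length = 0 then pvValid kb else (p.1, ms) :: pvValid kb

-- the canonical append-grouping step over (key, value) pairs
def pvMStep (d : PySem.Dict String (List String)) (q : String × String) :
    PySem.Dict String (List String) :=
  d.modify q.1 [] (fun l => l ++ [q.2])

-- B's grouping step, with the scanned list made explicit
def pvGStep (full : List (String × String)) (out : PySem.Dict String (List String))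
    (q : String × String) : PySem.Dict String (List String) :=
  if out.contains q.1 then out
  else out.insert q.1 ((full.filter (fun r => r.1 == q.1)).map Prod.snd)

lemma pvGroup_eq_aux (ps : List (String × String)) :
    pvGroup ps = ps.foldl (pvGStep ps) PySem.Dict.empty := rfl

-- the items both groupings produce: first-occurrence keys, each with all its values
def pvCanon (ps : List (String × String)) : List (String × List String) :=
  (PySem.Set.ofList (ps.map Prod.fst)).map
    (fun k => (k, (ps.filter (fun r => r.1 == k)).map Prod.snd))

lemma pv_g_keys (full rest : List (String × String)) (d : PySem.Dict String (List String)) :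
    (rest.foldl (pvGStep full) d).keys = PySem.Set.update d.keys (rest.map Prod.fst) := by
  induction rest generalizing d with
  | nil => simp [PySem.Set.update]
  | cons q rest ih =>
    rw [List.foldl_cons, List.map_cons, PySem.Set.update_cons]
    by_cases h : d.contains q.1 = true
    · rw [show pvGStep full d q = d by simp [pvGStep, h], ih]
      rw [PySem.Set.add_of_mem ((PySem.Dict.contains_iff_mem_keys d q.1).mp h)]
    · have h' : d.contains q.1 = false := by simpa using h
      rw [show pvGStep full d q
          = d.insert q.1 ((full.filter (fun r => r.1 == q.1)).map Prod.snd) by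
        simp [pvGStep, h'], ih]
      rw [PySem.Dict.keys_insert_of_not_contains _ _ h',
        PySem.Set.add_of_not_mem (fun hm => by
          simp [(PySem.Dict.contains_iff_mem_keys d q.1).mpr hm] at h')]

lemma pv_g_getD (full rest : List (String × String)) (d : PySem.Dict String (List String))
    (k : String) :
    (rest.foldl (pvGStep full) d).getD k [] =
      if d.contains k then d.getD k []
      else if k ∈ rest.map Prod.fst then (full.filter (fun r => r.1 == k)).map Prod.snd
      else [] := by
  induction rest generalizing d with
  | nil => by_cases h : d.contains k = true <;> simp_all [PySem.Dict.getD_of_not_contains]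
  | cons q rest ih =>
    rw [List.foldl_cons]
    by_cases hq : d.contains q.1 = true
    · rw [show pvGStep full d q = d by simp [pvGStep, hq], ih]
      by_cases hk : d.contains k = true
      · simp [hk]
      · have hne : k ≠ q.1 := fun he => by rw [he] at hk; exact hk hq
        have hmem : (k ∈ q.1 :: rest.map Prod.fst) ↔ k ∈ rest.map Prod.fst := by
          simp [List.mem_cons, hne]
        rw [if_neg hk, if_neg hk]
        by_cases hm : k ∈ List.map Prod.fst rest
        · simp [List.mem_cons, hne, hm]
        · simp [List.mem_cons, hne, hm]
    · have hq' : d.contains q.1 = false := by simpa using hq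
      rw [show pvGStep full d q
          = d.insert q.1 ((full.filter (fun r => r.1 == q.1)).map Prod.snd) by
        simp [pvGStep, hq'], ih]
      by_cases he : k = q.1
      · subst he
        simp [PySem.Dict.contains_insert_self, PySem.Dict.getD_insert_self, hq']
      · rw [PySem.Dict.contains_insert, PySem.Dict.getD_insert_of_ne _ _ _ he]
        have hb : (k == q.1) = false := by simpa using he
        have hmem : (k ∈ q.1 :: rest.map Prod.fst) ↔ k ∈ rest.map Prod.fst := by
          simp [List.mem_cons, he]
        by_cases hk : d.contains k = true
        · simp [hk, hb]
        · rw [if_neg hk]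
          simp only [hb, Bool.false_or]
          rw [if_neg hk]
          by_cases hm : k ∈ List.map Prod.fst rest
          · simp [List.mem_cons, he, hm]
          · simp [List.mem_cons, he, hm]

lemma pv_canon_of_fold (ps : List (String × String))
    (step : PySem.Dict String (List String) → String × String → PySem.Dict String (List String))
    (hkeys : (ps.foldl step PySem.Dict.empty).keys = PySem.Set.ofList (ps.map Prod.fst))
    (hnd : (ps.foldl step PySem.Dict.empty).keys.Nodup)
    (hget : ∀ k ∈ ps.map Prod.fst,
      (ps.foldl step PySem.Dict.empty).getD k [] = (ps.filter (fun r => r.1 == k)).map Prod.snd) :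
    (ps.foldl step PySem.Dict.empty).items = pvCanon ps := by
  rw [PySem.Dict.items_eq_map_keys _ hnd ([] : List String), hkeys, pvCanon]
  exact List.map_congr_left (fun k hk => by
    rw [hget k ((PySem.Set.mem_ofList _ _).mp hk)])

lemma pv_group_items (ps : List (String × String)) : (pvGroup ps).items = pvCanon ps := by
  rw [pvGroup_eq_aux]
  refine pv_canon_of_fold ps (pvGStep ps) ?_ ?_ ?_
  · rw [pv_g_keys]
    simp [PySem.Set.update_nil_left]
  · rw [pv_g_keys]
    simp [PySem.Set.update_nil_left, PySem.Set.nodup_ofList]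
  · intro k hk
    rw [pv_g_getD]
    simp [hk]

lemma pv_mfold_items (ps : List (String × String)) :
    (ps.foldl pvMStep PySem.Dict.empty).items = pvCanon ps := by
  refine pv_canon_of_fold ps pvMStep ?_ ?_ ?_
  · have := PySem.Dict.keys_foldl_modify_key ps Prod.fst ([] : List String)
      (fun _ q => fun l => l ++ [q.2]) PySem.Dict.empty
    simpa [pvMStep, PySem.Set.update_nil_left] using this
  · have := PySem.Dict.nodup_keys_foldl_modify_key ps Prod.fst ([] : List String)
      (fun _ q => fun l => l ++ [q.2]) PySem.Dict.empty (by simp)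
    simpa [pvMStep] using this
  · intro k _
    have := PySem.Dict.getD_foldl_modify_append ps PySem.Dict.empty k
    simpa [pvMStep] using this

-- B's grouping equals the canonical append-grouping fold
lemma pv_group_eq_mfold (ps : List (String × String)) :
    pvGroup ps = ps.foldl pvMStep PySem.Dict.empty :=
  PySem.Dict.ext ((pv_group_items ps).trans (pv_mfold_items ps).symm)

-- appending repeatedly to the value of the last key
lemma pv_run_mid (ms : List String) (pre : List (String × List String)) (t : String)
    (v : List String) (ht : ∀ q ∈ pre, q.1 ≠ t) :
    ms.foldl (fun d' ds => PySem.Dict.modify d' t [] (fun l => l ++ [ds]))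
        (PySem.Dict.mk (pre ++ [(t, v)]))
      = PySem.Dict.mk (pre ++ [(t, v ++ ms)]) := by
  induction ms generalizing v with
  | nil => simp
  | cons x xs ih =>
    have hstep : PySem.Dict.modify (PySem.Dict.mk (pre ++ [(t, v)])) t [] (fun l => l ++ [x])
        = PySem.Dict.mk (pre ++ [(t, v ++ [x])]) := by
      have hcon : (PySem.Dict.mk (pre ++ [(t, v)])).contains t = true := by
        simp [PySem.Dict.contains]
      have hfind : (PySem.Dict.mk (pre ++ [(t, v)])).get? t = some v := by
        simp only [PySem.Dict.get?, List.find?_append]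
        have : pre.find? (fun p => p.1 == t) = none := by
          rw [List.find?_eq_none]
          intro q hq
          simpa using ht q hq
        simp [this]
      simp only [PySem.Dict.modify, PySem.Dict.getD, hfind, Option.getD_some,
        PySem.Dict.insert, hcon, if_true]
      congr 1
      simp only [List.map_append]
      congr 1
      · have hid : ∀ q ∈ pre,
            (fun p => if (p.1 == t) = true then (t, v ++ [x]) else p) q = id q := by
          intro q hq
          simp [ht q hq]
        rw [List.map_congr_left hid, List.map_id]
      · simp
    rw [List.foldl_cons, hstep, ih (v ++ [x])]
    simp

-- A's first phase, from a partial dictionary whose keys avoid the remaining topics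
lemma pv_phase1_char (kb : List (String × List (String × Option (List String))))
    (pre : List (String × List String))
    (hdis : ∀ p ∈ kb, ∀ q ∈ pre, q.1 ≠ p.1)
    (hnd : (kb.map Prod.fst).Nodup) :
    kb.foldl pvA_phase1_body (PySem.Dict.mk pre) = PySem.Dict.mk (pre ++ pvValid kb) := by
  induction kb generalizing pre with
  | nil => simp [pvValid]
  | cons p kb' ih =>
    rw [List.foldl_cons]
    have hndtail : (kb'.map Prod.fst).Nodup := by
      rw [List.map_cons, List.nodup_cons] at hnd
      exact hnd.2
    have hhead : ∀ p' ∈ kb', p'.1 ≠ p.1 := by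
      intro p' hp' he
      rw [List.map_cons, List.nodup_cons] at hnd
      exact hnd.1 (by rw [← he]; exact List.mem_map_of_mem hp')
    cases hms : (PySem.Dict.mk p.2).getD "matches" none with
    | none =>
      have : pvA_phase1_body (PySem.Dict.mk pre) p = PySem.Dict.mk pre := by
        simp [pvA_phase1_body, pvLookMatches, hms]
      rw [this, ih pre (fun p' hp' q hq => hdis p' (List.mem_cons_of_mem _ hp') q hq) hndtail]
      simp [pvValid, hms]
    | some ms =>
      by_cases hlen : ms.length = 0
      · have : pvA_phase1_body (PySem.Dict.mk pre) p = PySem.Dict.mk pre := by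
          simp [pvA_phase1_body, pvLookMatches, hms, hlen]
        rw [this, ih pre (fun p' hp' q hq => hdis p' (List.mem_cons_of_mem _ hp') q hq) hndtail]
        simp [pvValid, hms, hlen]
      · have hpre : ∀ q ∈ pre, q.1 ≠ p.1 := fun q hq => hdis p (List.mem_cons_self ..) q hq
        have hcon : (PySem.Dict.mk pre).contains p.1 = false := by
          simp only [PySem.Dict.contains, List.any_eq_false]
          intro q hq
          simpa using hpre q hq
        have hins : (PySem.Dict.mk pre).insert p.1 ([] : List String)
            = PySem.Dict.mk (pre ++ [(p.1, [])]) := by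
          simp [PySem.Dict.insert, hcon]
        have hstep : pvA_phase1_body (PySem.Dict.mk pre) p
            = PySem.Dict.mk (pre ++ [(p.1, ms)]) := by
          simp only [pvA_phase1_body, pvLookMatches, hms, hlen, if_false, hcon,
            Bool.false_eq_true, hins]
          simpa using pv_run_mid ms pre p.1 [] hpre
        rw [hstep]
        have := ih (pre ++ [(p.1, ms)])
          (fun p' hp' q hq => by
            rcases List.mem_append.mp hq with h | h
            · exact hdis p' (List.mem_cons_of_mem _ hp') q h
            · simp only [List.mem_singleton] at h
              subst h
              exact (hhead p' hp').symm)
          hndtail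
        rw [this]
        simp [pvValid, hms, hlen, List.append_assoc]

-- the edge-list fold, per topic, equals A's per-topic append loop
lemma pv_mfold_blocks (kb : List (String × List (String × Option (List String))))
    (pre : List (String × List String))
    (hdis : ∀ p ∈ kb, ∀ q ∈ pre, q.1 ≠ p.1)
    (hnd : (kb.map Prod.fst).Nodup) :
    (pvPairs kb).foldl pvMStep (PySem.Dict.mk pre) = PySem.Dict.mk (pre ++ pvValid kb) := by
  induction kb generalizing pre with
  | nil => simp [pvPairs, pvValid]
  | cons p kb' ih =>
    have hndtail : (kb'.map Prod.fst).Nodup := by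
      rw [List.map_cons, List.nodup_cons] at hnd
      exact hnd.2
    have hhead : ∀ p' ∈ kb', p'.1 ≠ p.1 := by
      intro p' hp' he
      rw [List.map_cons, List.nodup_cons] at hnd
      exact hnd.1 (by rw [← he]; exact List.mem_map_of_mem hp')
    cases hms : (PySem.Dict.mk p.2).getD "matches" none with
    | none =>
      rw [show pvPairs (p :: kb') = pvPairs kb' by simp [pvPairs, hms],
        ih pre (fun p' hp' q hq => hdis p' (List.mem_cons_of_mem _ hp') q hq) hndtail]
      simp [pvValid, hms]
    | some ms =>
      have hsplit : pvPairs (p :: kb')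
          = ms.map (fun ds => (p.1, ds)) ++ pvPairs kb' := by
        simp [pvPairs, hms]
      rw [hsplit, List.foldl_append]
      by_cases hlen : ms.length = 0
      · obtain rfl : ms = [] := List.length_eq_zero_iff.mp hlen
        rw [List.map_nil, List.foldl_nil,
          ih pre (fun p' hp' q hq => hdis p' (List.mem_cons_of_mem _ hp') q hq) hndtail]
        simp [pvValid, hms]
      · have hpre : ∀ q ∈ pre, q.1 ≠ p.1 := fun q hq => hdis p (List.mem_cons_self ..) q hq
        have hcon : (PySem.Dict.mk pre).contains p.1 = false := by
          simp only [PySem.Dict.contains, List.any_eq_false]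
          intro q hq
          simpa using hpre q hq
        obtain ⟨x, xs, rfl⟩ : ∃ x xs, ms = x :: xs := by
          cases ms with
          | nil => exact absurd rfl hlen
          | cons x xs => exact ⟨x, xs, rfl⟩
        have hget : (PySem.Dict.mk pre).getD p.1 ([] : List String) = [] :=
          PySem.Dict.getD_of_not_contains _ _ hcon
        have hfirst : PySem.Dict.modify (PySem.Dict.mk pre) p.1 [] (fun l => l ++ [x])
            = PySem.Dict.mk (pre ++ [(p.1, [x])]) := by
          simp only [PySem.Dict.modify, hget, PySem.Dict.insert, hcon]
          simp
        have hblock : ((x :: xs).map (fun ds => (p.1, ds))).foldl pvMStep (PySem.Dict.mk pre)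
            = PySem.Dict.mk (pre ++ [(p.1, x :: xs)]) := by
          rw [List.foldl_map]
          simp only [pvMStep, List.foldl_cons, hfirst]
          simpa using pv_run_mid xs pre p.1 [x] hpre
        rw [hblock]
        rw [ih (pre ++ [(p.1, x :: xs)])
          (fun p' hp' q hq => by
            rcases List.mem_append.mp hq with h | h
            · exact hdis p' (List.mem_cons_of_mem _ hp') q h
            · simp only [List.mem_singleton] at h
              subst h
              exact (hhead p' hp').symm)
          hndtail]
        simp [pvValid, hms, List.append_assoc]

-- A's `if ds not in r: r[ds] = []` followed by append IS the plain modify step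
lemma pv_step2_eq (r : PySem.Dict String (List String)) (ds t : String) :
    (let r1 := if r.contains ds then r else r.insert ds ([] : List String)
     r1.modify ds [] (fun l => l ++ [t])) = r.modify ds [] (fun l => l ++ [t]) := by
  by_cases h : r.contains ds = true
  · simp [h]
  · have h' : r.contains ds = false := by simpa using h
    simp only [h', Bool.false_eq_true, if_false]
    simp only [PySem.Dict.modify, PySem.Dict.getD_insert_self,
      PySem.Dict.getD_of_not_contains _ _ h', PySem.Dict.insert_insert_self]

-- A's second phase is the canonical fold over the swapped edge blocks
lemma pv_phase2_flat (L : List (String × List String)) (r : PySem.Dict String (List String)) :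
    L.foldl pvA_phase2_body r
      = (L.flatMap (fun p => p.2.map (fun ds => (ds, p.1)))).foldl pvMStep r := by
  induction L generalizing r with
  | nil => simp
  | cons p L ih =>
    rw [List.foldl_cons, List.flatMap_cons, List.foldl_append, List.foldl_map]
    have hbody : pvA_phase2_body r p
        = p.2.foldl (fun r' ds => pvMStep r' (ds, p.1)) r := by
      unfold pvA_phase2_body
      congr 1
      funext r' ds
      simpa [pvMStep] using pv_step2_eq r' ds p.1
    rw [hbody, ih]

-- the swapped edge list of the processed blocks is B's swapped pair list
lemma pv_swap_flat (kb : List (String × List (String × Option (List String)))) :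
    (pvValid kb).flatMap (fun p => p.2.map (fun ds => (ds, p.1)))
      = (pvPairs kb).map (fun q => (q.2, q.1)) := by
  induction kb with
  | nil => simp [pvPairs, pvValid]
  | cons p kb' ih =>
    have hsplit : pvPairs (p :: kb')
        = (match (PySem.Dict.mk p.2).getD "matches" none with
           | none => []
           | some ms => ms.map (fun ds => (p.1, ds))) ++ pvPairs kb' := by
      simp [pvPairs]
    rw [hsplit, List.map_append]
    cases hms : (PySem.Dict.mk p.2).getD "matches" none with
    | none => simp [pvValid, hms, ih]
    | some ms =>
      by_cases hlen : ms.length = 0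
      · obtain rfl : ms = [] := List.length_eq_zero_iff.mp hlen
        simp [pvValid, hms, ih]
      · simp [pvValid, hms, hlen, ih, List.map_map, Function.comp_def]

-- ===== VERDICT (by name: the statement is the Claim_ definition above) =====
theorem v1_transfer_topics_spec : Claim_equal_v1_transfer_topics := by
  intro kb _ hpre
  unfold Spec_v1_transfer_topics v1_transfer_topics v1_transfer_topics_alt
  have hempty : (PySem.Dict.empty : PySem.Dict String (List String)) = PySem.Dict.mk [] := rfl
  have hA1 : kb.foldl pvA_phase1_body PySem.Dict.empty = PySem.Dict.mk (pvValid kb) := by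
    rw [hempty, pv_phase1_char kb [] (by simp) hpre.1]
    rfl
  have hB1 : pvGroup (pvPairs kb) = PySem.Dict.mk (pvValid kb) := by
    rw [pv_group_eq_mfold, hempty, pv_mfold_blocks kb [] (by simp) hpre.1]
    rfl
  have hRev : (pvValid kb).foldl pvA_phase2_body PySem.Dict.empty
      = pvGroup ((pvPairs kb).map (fun q => (q.2, q.1))) := by
    rw [pv_phase2_flat, pv_swap_flat, pv_group_eq_mfold]
  simp only [hA1, hB1, hRev]
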